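-- pv_equiv track=rewrite | github.com/chyanchyan/Qpoker | meta.py | index_split_code_block
-- ===== SOURCE A (Python) =====
-- def index_split_code_block(code_lines):
--     if len(code_lines) > 0:
--         sts = [i for i in range(len(code_lines)) if
--                len(code_lines[i].strip()) > 0 and code_lines[i][0] != ' '
--                ]
--
--         return list(zip(sts, sts[1:] + [len(code_lines)]))
--     else:
--         return []
-- ===== SOURCE B (Python) =====
-- def index_split_code_block(code_lines):
--     res = []
--     end = len(code_lines)
--     for i, line in reversed(list(enumerate(code_lines))):
--         if line.strip() and line[0] != ' ':
--             res.append((i, end))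
--             end = i
--     res.reverse()
--     return res
-- ===== Notes on version B (the rewrite author's own statement) =====
-- stated objective: alternative
-- what changed: B scans the lines in reverse, carrying the current block's end boundary and emitting each (start, end) pair back-to-front, instead of A's forward comprehension collecting all start indices and zipping it with its shifted copy.
import Mathlib
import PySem

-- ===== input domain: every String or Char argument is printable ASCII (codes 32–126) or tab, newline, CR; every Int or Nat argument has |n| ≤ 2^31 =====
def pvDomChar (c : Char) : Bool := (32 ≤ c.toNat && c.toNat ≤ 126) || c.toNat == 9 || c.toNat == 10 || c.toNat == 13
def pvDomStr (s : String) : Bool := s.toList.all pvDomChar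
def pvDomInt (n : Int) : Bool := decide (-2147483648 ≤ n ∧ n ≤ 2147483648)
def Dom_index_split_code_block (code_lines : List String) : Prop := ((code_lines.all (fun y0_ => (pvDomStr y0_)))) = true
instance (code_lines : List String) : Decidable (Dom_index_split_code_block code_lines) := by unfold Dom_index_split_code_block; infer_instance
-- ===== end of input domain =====

-- B scans the lines in reverse, carrying the current end boundary and emitting pairs
-- back-to-front, instead of A's collect-start-indices-then-zip-with-shifted-copy; objective: alternative.

-- ===== PORT A =====
-- 'len(line.strip()) > 0 and line[0] != " "' — the second conjunct only evaluated when the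
-- first holds (then the string is nonempty, so pyGet? is some), matching Python's short circuit.
def pvTopLevel (s : String) : Bool :=
  PySem.Str.len (PySem.Str.strip s) > 0 && PySem.Str.pyGet? s 0 != some ' '

def index_split_code_block (code_lines : List String) : List (Int × Int) :=
  if code_lines.length > 0 then
    let sts : List Int :=
      (PySem.List.pyRange 0 (code_lines.length : Int) 1).filter
        (fun i => pvTopLevel (PySem.List.pyGetD code_lines i ""))
    List.zip sts (sts.drop 1 ++ [(code_lines.length : Int)])
  else []

-- ===== PORT B =====
def index_split_code_block_alt (code_lines : List String) : List (Int × Int) :=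
  let st : Int × List (Int × Int) :=
    ((PySem.List.enumerate code_lines 0).reverse).foldl
      (fun st p =>
        if pvTopLevel p.2 then (p.1, st.2 ++ [(p.1, st.1)]) else st)
      ((code_lines.length : Int), [])
  st.2.reverse

-- ===== PRECONDITION & SPEC =====
def Spec_index_split_code_block (code_lines : List String) (out : List (Int × Int)) : Prop := out = index_split_code_block_alt code_lines
instance (code_lines : List String) (out : List (Int × Int)) : Decidable (Spec_index_split_code_block code_lines out) := by unfold Spec_index_split_code_block; infer_instance

-- ===== CLAIM (what is proved, stated in full; the proofs are below) =====
def Claim_equal_index_split_code_block : Prop := ∀ (code_lines : List String), Dom_index_split_code_block code_lines → Spec_index_split_code_block code_lines (index_split_code_block code_lines)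

-- ===== LEMMAS AND PROOFS =====

-- the pure step B's reversed fold performs on the top-level indices only
def pvStep (st : Int × List (Int × Int)) (i : Int) : Int × List (Int × Int) :=
  (i, st.2 ++ [(i, st.1)])

-- A's filtered range equals the fst-projection of the filtered enumeration
theorem pv_filter_range (cl : List String) (a : Int) :
    (PySem.List.pyRange a (a + cl.length) 1).filter
        (fun i => pvTopLevel (PySem.List.pyGetD cl (i - a) "")) =
      ((PySem.List.enumerate cl a).filter (fun p => pvTopLevel p.2)).map (·.1) := by
  induction cl generalizing a with
  | nil => simp [PySem.List.pyRange_one_eq_nil, PySem.List.enumerate_nil]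
  | cons x xs ih =>
    rw [PySem.List.pyRange_one_cons (by simp), PySem.List.enumerate_cons]
    have hsplit : ∀ i, i ∈ PySem.List.pyRange (a + 1) (a + (x :: xs).length) 1 →
        (pvTopLevel (PySem.List.pyGetD (x :: xs) (i - a) "") =
          pvTopLevel (PySem.List.pyGetD xs (i - (a + 1)) "")) := by
      intro i hi
      rw [PySem.List.mem_pyRange_one] at hi
      have h2 : 0 ≤ i - a - 1 := by omega
      obtain ⟨k, hk⟩ := Int.eq_ofNat_of_zero_le h2
      have hL : i - a = ((k + 1 : Nat) : Int) := by push_cast; omega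
      have hR : i - (a + 1) = ((k : Nat) : Int) := by omega
      rw [hL, hR, PySem.List.pyGetD_natCast, PySem.List.pyGetD_natCast]
      simp
    simp only [List.filter_cons]
    rw [List.filter_congr hsplit]
    have harg : a - a = (0 : Int) := by ring
    have h0 : PySem.List.pyGetD (x :: xs) (a - a) "" = x := by
      rw [harg]; simp [PySem.List.pyGetD_zero_cons]
    rw [h0]
    have htail := ih (a + 1)
    have hlen : a + 1 + (xs.length : Int) = a + ((x :: xs).length : Int) := by
      simp; ring
    rw [hlen] at htail
    rw [htail]
    cases h : pvTopLevel x <;> simp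

-- B's fold over any pair list equals the pure fold over the kept first components
theorem pv_fold_filter (l : List (Int × String)) (init : Int × List (Int × Int)) :
    l.foldl
        (fun st p => if pvTopLevel p.2 then (p.1, st.2 ++ [(p.1, st.1)]) else st) init =
      ((l.filter (fun p => pvTopLevel p.2)).map (·.1)).foldl pvStep init := by
  induction l generalizing init with
  | nil => simp
  | cons x xs ih =>
    simp only [List.foldl_cons, List.filter_cons]
    cases h : pvTopLevel x.2 <;> simp [ih, pvStep]

-- folding the reversed chain of top-level indices builds A's zip, reversed
theorem pv_rev_fold (ts : List Int) (n : Int) (acc : List (Int × Int)) :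
    ts.reverse.foldl pvStep (n, acc) =
      (ts.headD n, acc ++ (List.zip ts (ts.drop 1 ++ [n])).reverse) := by
  induction ts generalizing acc with
  | nil => simp
  | cons t rest ih =>
    rw [List.reverse_cons, List.foldl_append]
    rw [ih]
    cases rest with
    | nil => simp [pvStep, List.zip]
    | cons r rest' => simp [pvStep, List.zip]

theorem pv_main (cl : List String) :
    index_split_code_block cl = index_split_code_block_alt cl := by
  unfold index_split_code_block index_split_code_block_alt
  rw [pv_fold_filter, List.filter_reverse, List.map_reverse]
  have hfr := pv_filter_range cl 0
  simp only [zero_add, Int.sub_zero] at hfr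
  cases hcl : cl with
  | nil => simp [PySem.List.enumerate_nil]
  | cons y ys =>
    rw [← hcl]
    have hpos : cl.length > 0 := by rw [hcl]; simp
    rw [if_pos hpos, hfr]
    set ts := ((PySem.List.enumerate cl 0).filter (fun p => pvTopLevel p.2)).map (·.1) with hts
    show List.zip ts (ts.drop 1 ++ [(cl.length : Int)]) =
      (ts.reverse.foldl pvStep ((cl.length : Int), [])).2.reverse
    rw [pv_rev_fold]
    simp

-- ===== VERDICT (by name: the statement is the Claim_ definition above) =====
theorem index_split_code_block_spec : Claim_equal_index_split_code_block := by
  intro cl _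
  exact pv_main cl
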